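-- pv_equiv track=rewrite | github.com/plocher/jBOM | src/jbom/cli/inventory.py | _merge_field_names
-- ===== SOURCE A (Python) =====
-- def _merge_field_names(all_field_names: set[str]) -> list[str]:
--     """Return a deterministic ordered field list from a union of field name sets.
--
--     Canonical inventory fields appear first in a fixed order; any additional
--     fields discovered across projects are appended alphabetically.
--     """
--     canonical_order = [
--         "RowType",
--         "ComponentID",
--         "IPN",
--         "Category",
--         "Value",
--         "Package",
--         "Description",
--         "Keywords",
--         "Manufacturer",
--         "MFGPN",
--         "LCSC",
--         "Datasheet",
--         "Resistance",
--         "Capacitance",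
--         "Inductance",
--         "UUID",
--         "footprint_full",
--         "symbol_lib",
--         "symbol_name",
--         "ki_keywords",
--     ]
--     ordered: list[str] = []
--     seen: set[str] = set()
--     for field in canonical_order:
--         if field in all_field_names:
--             ordered.append(field)
--             seen.add(field)
--     for field in sorted(all_field_names - seen):
--         ordered.append(field)
--     return ordered
-- ===== SOURCE B (Python) =====
-- def _merge_field_names(all_field_names: set[str]) -> list[str]:
--     """Return a deterministic ordered field list from a union of field name sets.
--
--     Single table-driven sort: canonical fields get their fixed rank, all other
--     fields share the sentinel rank and are tie-broken alphabetically.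
--     """
--     canonical_order = [
--         "RowType",
--         "ComponentID",
--         "IPN",
--         "Category",
--         "Value",
--         "Package",
--         "Description",
--         "Keywords",
--         "Manufacturer",
--         "MFGPN",
--         "LCSC",
--         "Datasheet",
--         "Resistance",
--         "Capacitance",
--         "Inductance",
--         "UUID",
--         "footprint_full",
--         "symbol_lib",
--         "symbol_name",
--         "ki_keywords",
--     ]
--     rank = {name: i for i, name in enumerate(canonical_order)}
--     sentinel = len(canonical_order)
--     return sorted(all_field_names, key=lambda f: (rank.get(f, sentinel), f))
-- ===== Notes on version B (the rewrite author's own statement) =====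
-- stated objective: simpler
-- what changed: Replaces the two-pass filter-over-canonical-then-sort-the-rest construction by a single sorted() call over the input with a composite key (rank from an index dict with sentinel len(canonical_order), then the name itself).
import Mathlib
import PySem

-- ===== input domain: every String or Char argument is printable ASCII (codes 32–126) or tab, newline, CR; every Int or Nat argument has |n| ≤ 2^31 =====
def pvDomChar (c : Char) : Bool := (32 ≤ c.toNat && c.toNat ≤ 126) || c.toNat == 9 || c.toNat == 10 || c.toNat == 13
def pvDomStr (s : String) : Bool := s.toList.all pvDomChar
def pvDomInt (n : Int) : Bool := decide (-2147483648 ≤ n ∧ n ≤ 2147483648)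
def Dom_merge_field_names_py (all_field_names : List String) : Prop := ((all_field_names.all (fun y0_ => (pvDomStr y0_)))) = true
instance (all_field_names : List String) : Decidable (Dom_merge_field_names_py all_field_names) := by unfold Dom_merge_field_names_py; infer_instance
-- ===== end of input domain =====

-- B replaces A's two passes (filter the canonical list, then sort the leftovers) by one
-- sorted() over the input with a composite (rank, name) key; objective: simpler.


-- ===== PORT A =====
-- the shared literal `canonical_order` constant of both Pythons
def canonicalOrderPy : List String :=
  ["RowType", "ComponentID", "IPN", "Category", "Value", "Package", "Description",
   "Keywords", "Manufacturer", "MFGPN", "LCSC", "Datasheet", "Resistance",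
   "Capacitance", "Inductance", "UUID", "footprint_full", "symbol_lib",
   "symbol_name", "ki_keywords"]

def merge_field_names_py (all_field_names : List String) : List String :=
  -- the two-accumulator loop over canonical_order: `ordered`, `seen`
  let st := canonicalOrderPy.foldl
    (fun (st : List String × PySem.Set String) field =>
      if all_field_names.contains field then (st.1 ++ [field], PySem.Set.add st.2 field) else st)
    ([], PySem.Set.empty)
  -- for field in sorted(all_field_names - seen): ordered.append(field)
  st.1 ++ PySem.List.sorted (PySem.Set.diff all_field_names st.2) (fun x => x) false

-- ===== PORT B =====
-- rank = {name: i for i, name in enumerate(canonical_order)}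
def pyRankIndex : PySem.Dict String Int :=
  (PySem.List.enumerate canonicalOrderPy).foldl
    (fun d p => d.insert p.2 p.1) PySem.Dict.empty

def merge_field_names_py_alt (all_field_names : List String) : List String :=
  let sentinel : Int := PySem.List.len canonicalOrderPy
  PySem.List.sorted2 all_field_names
    (fun f => PySem.Dict.getD pyRankIndex f sentinel) (fun f => f) false

-- ===== PRECONDITION & SPEC =====
-- The parameter models a Python set[str]: a list of DISTINCT strings (the type convention).
def Pre_merge_field_names_py (all_field_names : List String) : Prop := all_field_names.Nodup
instance (all_field_names : List String) : Decidable (Pre_merge_field_names_py all_field_names) := by unfold Pre_merge_field_names_py; infer_instance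

def pvWitness_merge_field_names_py : List String := ["Extra", "IPN", "a field", "Value"]

def Spec_merge_field_names_py (all_field_names : List String) (out : List String) : Prop := out = merge_field_names_py_alt all_field_names
instance (all_field_names : List String) (out : List String) : Decidable (Spec_merge_field_names_py all_field_names out) := by unfold Spec_merge_field_names_py; infer_instance

-- ===== CLAIM (what is proved, stated in full; the proofs are below) =====
def Claim_equal_merge_field_names_py : Prop := ∀ (all_field_names : List String), Dom_merge_field_names_py all_field_names → Pre_merge_field_names_py all_field_names → Spec_merge_field_names_py all_field_names (merge_field_names_py all_field_names)

-- ===== LEMMAS AND PROOFS =====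

-- B's composite sort key, as a value in the lexicographic order on Int × String
def pvKey (f : String) : Lex (Int × String) := toLex (PySem.Dict.getD pyRankIndex f 20, f)

-- sorted2 with keys (k1, k2) IS sorted with the lexicographic key
theorem pvSorted2_eq_sorted_lex (xs : List String) (k1 : String → Int) (k2 : String → String) :
    PySem.List.sorted2 xs k1 k2 false
      = PySem.List.sorted xs (fun x => toLex (k1 x, k2 x)) false := by
  have hb : (fun a b => decide (k1 a < k1 b) || (!decide (k1 b < k1 a) && decide (k2 a < k2 b)))
      = (fun a b => decide (toLex (k1 a, k2 a) < toLex (k1 b, k2 b))) := by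
    funext a b
    by_cases h1 : k1 a < k1 b
    · simp [h1, Prod.Lex.lt_iff]
    · by_cases h2 : k1 b < k1 a
      · have hne : k1 a ≠ k1 b := by omega
        simp [h1, h2, Prod.Lex.lt_iff, hne]
      · have he : k1 a = k1 b := le_antisymm (not_lt.mp h2) (not_lt.mp h1)
        simp [Prod.Lex.lt_iff, he]
  unfold PySem.List.sorted2 PySem.List.sorted
  simp only [Bool.false_eq_true, if_false, hb]

theorem pvCanon_nodup : canonicalOrderPy.Nodup := by decide

theorem pvCanon_pairwise : canonicalOrderPy.Pairwise (fun a b => pvKey a < pvKey b) := by decide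

theorem pvRank_lt_of_mem : ∀ x ∈ canonicalOrderPy, PySem.Dict.getD pyRankIndex x 20 < 20 := by decide

theorem pvKeys_rank : (PySem.Dict.keys pyRankIndex) = canonicalOrderPy := by decide

theorem pvRank_of_not_mem (x : String) (hx : x ∉ canonicalOrderPy) :
    PySem.Dict.getD pyRankIndex x 20 = 20 := by
  have h : pyRankIndex.get? x = none :=
    (PySem.Dict.get?_eq_none_iff_not_mem_keys pyRankIndex x).mpr (by rw [pvKeys_rank]; exact hx)
  rw [PySem.Dict.getD_eq_get?_getD, h]
  rfl

-- A's loop over canonical_order, characterised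
theorem pvFoldA (l : List String) (s : List String) (acc : List String) (seen : PySem.Set String) :
    l.foldl (fun (st : List String × PySem.Set String) field =>
        if s.contains field then (st.1 ++ [field], PySem.Set.add st.2 field) else st) (acc, seen)
      = (acc ++ l.filter (fun x => s.contains x),
         (l.filter (fun x => s.contains x)).foldl PySem.Set.add seen) := by
  induction l generalizing acc seen with
  | nil => simp
  | cons y t ih =>
    by_cases hy : s.contains y = true
    · simp only [List.foldl_cons, List.filter_cons, hy, if_true, ih, List.foldl_cons]
      simp
    · simp only [List.foldl_cons, List.filter_cons, hy, if_false, ih, Bool.false_eq_true]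

theorem pvMem_foldl_add (l : List String) (seen : PySem.Set String) (x : String) :
    x ∈ l.foldl PySem.Set.add seen ↔ x ∈ seen ∨ x ∈ l := by
  induction l generalizing seen with
  | nil => simp
  | cons y t ih =>
    simp [List.foldl_cons, ih, PySem.Set.mem_add]
    tauto

theorem merge_field_names_py_spec : Claim_equal_merge_field_names_py := by
  intro s _hdom hnd
  unfold Spec_merge_field_names_py merge_field_names_py merge_field_names_py_alt
  rw [show (PySem.List.len canonicalOrderPy) = (20 : Int) from rfl]
  rw [pvSorted2_eq_sorted_lex s _ _]
  rw [pvFoldA]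
  simp only [List.nil_append]
  -- name the two halves of A's output
  set CF : List String := canonicalOrderPy.filter (fun x => s.contains x) with hCF
  have hdiff : PySem.Set.diff s (CF.foldl PySem.Set.add PySem.Set.empty)
      = s.filter (fun x => !canonicalOrderPy.contains x) := by
    show s.filter _ = _
    apply List.filter_congr
    intro x hxs
    have : (x ∈ CF.foldl PySem.Set.add ([] : PySem.Set String)) ↔ x ∈ canonicalOrderPy := by
      rw [pvMem_foldl_add]
      constructor
      · rintro (h | h)
        · simp at h
        · exact (List.mem_filter.mp h).1
      · intro h
        exact Or.inr (List.mem_filter.mpr ⟨h, by simpa using hxs⟩)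
    by_cases hc : x ∈ canonicalOrderPy
    · simp [PySem.Set.contains, this, hc]
    · simp [PySem.Set.contains, this, hc]
  rw [hdiff]
  set SR : List String := PySem.List.sorted (s.filter (fun x => !canonicalOrderPy.contains x)) (fun x => x) false with hSR
  -- B's sort equals A's concatenation, by uniqueness of the strictly key-sorted permutation
  have hperm : (CF ++ SR).Perm s := by
    have p1 : CF.Perm (s.filter (fun x => canonicalOrderPy.contains x)) := by
      rw [List.perm_ext_iff_of_nodup (List.Nodup.filter _ pvCanon_nodup) (List.Nodup.filter _ hnd)]
      intro a
      simp only [List.mem_filter]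
      constructor
      · rintro ⟨h1, h2⟩; exact ⟨by simpa using h2, by simpa using h1⟩
      · rintro ⟨h1, h2⟩; exact ⟨by simpa using h2, by simpa using h1⟩
    have p2 : SR.Perm (s.filter (fun x => !canonicalOrderPy.contains x)) :=
      PySem.List.sorted_perm _ _ _
    exact (List.Perm.append p1 p2).trans (List.filter_append_perm _ s)
  have hpw : (CF ++ SR).Pairwise (fun a b => pvKey a < pvKey b) := by
    rw [List.pairwise_append]
    refine ⟨List.Pairwise.sublist List.filter_sublist pvCanon_pairwise, ?_, ?_⟩
    · -- inside the sorted remainder: rank is the sentinel, names strictly increase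
      have hnodup : SR.Nodup := by
        rw [hSR]
        exact ((PySem.List.sorted_perm _ _ _).symm.nodup (List.Nodup.filter _ hnd))
      have hle : SR.Pairwise (fun a b => a ≤ b) := by
        rw [hSR]
        exact PySem.List.sorted_pairwise _ (fun x => x)
      have hlt : SR.Pairwise (fun a b => a < b) := by
        refine (hle.and hnodup).imp ?_
        rintro a b ⟨h1, h2⟩
        exact lt_of_le_of_ne h1 h2
      refine hlt.imp_of_mem ?_
      intro a b ha hb hab
      have h20 : ∀ x ∈ SR, PySem.Dict.getD pyRankIndex x 20 = 20 := by
        intro x hx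
        have : x ∈ s.filter (fun x => !canonicalOrderPy.contains x) := by
          rw [hSR] at hx
          exact (PySem.List.mem_sorted _ _ _ _).mp hx
        exact pvRank_of_not_mem x (by simpa using (List.mem_filter.mp this).2)
      rw [show pvKey a < pvKey b ↔ _ from Prod.Lex.lt_iff]
      simp only [pvKey, ofLex_toLex]
      right
      exact ⟨by rw [h20 a ha, h20 b hb], hab⟩
    · -- across: every canonical field sorts before every leftover field
      intro a ha b hb
      have hac : a ∈ canonicalOrderPy := (List.mem_filter.mp ha).1
      have hbc : b ∉ canonicalOrderPy := by
        have : b ∈ s.filter (fun x => !canonicalOrderPy.contains x) :=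
          (PySem.List.mem_sorted _ _ _ _).mp hb
        simpa using (List.mem_filter.mp this).2
      rw [show pvKey a < pvKey b ↔ _ from Prod.Lex.lt_iff]
      simp only [pvKey, ofLex_toLex]
      left
      rw [pvRank_of_not_mem b hbc]
      exact pvRank_lt_of_mem a hac
  exact (PySem.List.sorted_eq_of_perm_of_pairwise_lt s (CF ++ SR) pvKey hperm hpw).symm
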